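-- pv_equiv track=rewrite | github.com/NeoDemos/NeoDemos | services/source_span_verifier.py | _check_facts_grounded
-- ===== SOURCE A (Python) =====
-- from typing import Any, List, Optional, Protocol, Set
--
-- def _check_facts_grounded(
--     fact_tokens: Set[str],
--     chunk_texts: List[str],
-- ) -> tuple[int, int]:
--     """Check how many fact tokens appear in ANY source chunk.
--
--     Returns (grounded_count, total_count).
--     """
--     if not fact_tokens:
--         return 0, 0
--
--     # Build a single lowercased corpus from all chunk texts for fast lookup.
--     corpus = " ".join(chunk_texts).lower()
--
--     grounded = 0
--     for token in fact_tokens: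
--         if token in corpus:
--             grounded += 1
--
--     return grounded, len(fact_tokens)
-- ===== SOURCE B (Python) =====
-- def _check_facts_grounded(fact_tokens, chunk_texts):
--     """Multi-pattern scan: slide a window of each distinct token length over
--     the corpus once and test the window against the token set, instead of one
--     substring search per token."""
--     corpus = " ".join(chunk_texts).lower()
--     tokens = set(fact_tokens)
--     lengths = {len(t) for t in tokens}
--     found = set()
--     for length in lengths:
--         for i in range(len(corpus) - length + 1):
--             window = corpus[i:i + length]
--             if window in tokens:
--                 found.add(window)
--     grounded = sum(1 for t in fact_tokens if t in found)
--     return grounded, len(fact_tokens)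
-- ===== Notes on version B (the rewrite author's own statement) =====
-- stated objective: faster
-- what changed: A runs one substring search over the joined corpus per token; B scans the corpus once per distinct token length, sliding a window of that length and testing it against a hash set of the tokens, so the work is O(corpus * distinct-lengths) instead of O(corpus * tokens).
import Mathlib
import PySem

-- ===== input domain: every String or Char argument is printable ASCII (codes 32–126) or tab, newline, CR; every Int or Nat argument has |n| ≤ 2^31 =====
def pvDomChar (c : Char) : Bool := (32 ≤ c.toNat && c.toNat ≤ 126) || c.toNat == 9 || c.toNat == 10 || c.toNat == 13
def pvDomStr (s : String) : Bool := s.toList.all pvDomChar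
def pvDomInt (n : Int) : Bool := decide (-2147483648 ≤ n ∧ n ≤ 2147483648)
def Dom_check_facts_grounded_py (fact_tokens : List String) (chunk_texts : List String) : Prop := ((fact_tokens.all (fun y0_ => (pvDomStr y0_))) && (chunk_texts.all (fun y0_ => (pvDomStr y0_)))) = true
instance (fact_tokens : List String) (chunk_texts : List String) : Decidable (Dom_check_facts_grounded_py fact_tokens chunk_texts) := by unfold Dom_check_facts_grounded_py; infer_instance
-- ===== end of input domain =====

-- B replaces A's one-substring-search-per-token by a multi-pattern scan: one sliding-window
-- pass over the corpus per distinct token length, testing each window against a hash set of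
-- the tokens (objective: faster when there are many tokens of few distinct lengths).


-- ===== PORT A =====
def check_facts_grounded_py (fact_tokens : List String) (chunk_texts : List String) : Int × Int :=
  if fact_tokens.isEmpty then (0, 0)
  else
    let corpus := PySem.Str.lower (PySem.Str.join " " chunk_texts)
    let grounded := fact_tokens.foldl
      (fun grounded token => if PySem.Str.isIn token corpus then grounded + 1 else grounded) (0 : Int)
    (grounded, (fact_tokens.length : Int))

-- ===== PORT B =====
-- Hand port of Source B. Strings are handled as List Char; Python's sets are PySem.Set.
-- range(len(corpus) - length + 1) has max(0, n - length + 1) elements for length ≥ 0, which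
-- is List.range (n + 1 - length) under Nat subtraction — exact; the slice corpus[i:i+length]
-- for 0 ≤ i is (corpus.drop i).take length — exact; sum(1 for t in … if t in found) is the
-- count of elements of fact_tokens whose text is in found.
def check_facts_grounded_py_alt (fact_tokens : List String) (chunk_texts : List String) : Int × Int :=
  let corpus := (PySem.Str.lower (PySem.Str.join " " chunk_texts)).toList
  let tokens : PySem.Set (List Char) := PySem.Set.ofList (fact_tokens.map String.toList)
  let lengths : PySem.Set Nat := PySem.Set.ofList (tokens.map List.length)
  let found : PySem.Set (List Char) :=
    lengths.foldl
      (fun fnd L =>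
        (List.range (corpus.length + 1 - L)).foldl
          (fun fnd i =>
            if PySem.Set.contains tokens ((corpus.drop i).take L)
            then PySem.Set.add fnd ((corpus.drop i).take L) else fnd)
          fnd)
      PySem.Set.empty
  let grounded : Int := fact_tokens.countP (fun t => PySem.Set.contains found t.toList)
  (grounded, (fact_tokens.length : Int))

-- ===== PRECONDITION & SPEC =====
def Spec_check_facts_grounded_py (fact_tokens : List String) (chunk_texts : List String) (out : Int × Int) : Prop := out = check_facts_grounded_py_alt fact_tokens chunk_texts
instance (fact_tokens : List String) (chunk_texts : List String) (out : Int × Int) : Decidable (Spec_check_facts_grounded_py fact_tokens chunk_texts out) := by unfold Spec_check_facts_grounded_py; infer_instance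

-- ===== CLAIM =====
def Claim_equal_check_facts_grounded_py : Prop := ∀ (fact_tokens : List String) (chunk_texts : List String), Dom_check_facts_grounded_py fact_tokens chunk_texts → Spec_check_facts_grounded_py fact_tokens chunk_texts (check_facts_grounded_py fact_tokens chunk_texts)

-- ===== LEMMAS AND PROOFS =====

-- membership through one conditional-add sweep
theorem pv_mem_inner (f : Nat → List Char) (p : Nat → Bool) :
    ∀ (li : List Nat) (acc : PySem.Set (List Char)) (x : List Char),
      x ∈ li.foldl (fun s i => if p i then PySem.Set.add s (f i) else s) acc
        ↔ x ∈ acc ∨ ∃ i ∈ li, p i = true ∧ x = f i := by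
  intro li
  induction li with
  | nil => intro acc x; simp
  | cons i is ih =>
    intro acc x
    rw [List.foldl_cons]
    by_cases h : p i = true
    · rw [h, if_pos rfl, ih, PySem.Set.mem_add]
      constructor
      · rintro ((hx | rfl) | ⟨j, hj, hpj, rfl⟩)
        · exact Or.inl hx
        · exact Or.inr ⟨i, List.mem_cons_self .., h, rfl⟩
        · exact Or.inr ⟨j, List.mem_cons_of_mem _ hj, hpj, rfl⟩
      · rintro (hx | ⟨j, hj, hpj, rfl⟩)
        · exact Or.inl (Or.inl hx)
        · rcases List.mem_cons.mp hj with rfl | hj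
          · exact Or.inl (Or.inr rfl)
          · exact Or.inr ⟨j, hj, hpj, rfl⟩
    · rw [if_neg h, ih]
      constructor
      · rintro (hx | ⟨j, hj, hpj, rfl⟩)
        · exact Or.inl hx
        · exact Or.inr ⟨j, List.mem_cons_of_mem _ hj, hpj, rfl⟩
      · rintro (hx | ⟨j, hj, hpj, rfl⟩)
        · exact Or.inl hx
        · rcases List.mem_cons.mp hj with rfl | hj
          · exact absurd hpj h
          · exact Or.inr ⟨j, hj, hpj, rfl⟩

-- membership through the sweep per length
theorem pv_mem_outer (f : Nat → Nat → List Char) (p : Nat → Nat → Bool) (bnd : Nat → Nat) :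
    ∀ (ls : List Nat) (acc : PySem.Set (List Char)) (x : List Char),
      x ∈ ls.foldl (fun fnd L =>
            (List.range (bnd L)).foldl
              (fun s i => if p L i then PySem.Set.add s (f L i) else s) fnd) acc
        ↔ x ∈ acc ∨ ∃ L ∈ ls, ∃ i ∈ List.range (bnd L), p L i = true ∧ x = f L i := by
  intro ls
  induction ls with
  | nil => intro acc x; simp
  | cons L Ls ih =>
    intro acc x
    rw [List.foldl_cons, ih, pv_mem_inner]
    constructor
    · rintro ((hx | ⟨i, hi, hp, rfl⟩) | ⟨M, hM, i, hi, hp, rfl⟩)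
      · exact Or.inl hx
      · exact Or.inr ⟨L, List.mem_cons_self .., i, hi, hp, rfl⟩
      · exact Or.inr ⟨M, List.mem_cons_of_mem _ hM, i, hi, hp, rfl⟩
    · rintro (hx | ⟨M, hM, i, hi, hp, rfl⟩)
      · exact Or.inl (Or.inl hx)
      · rcases List.mem_cons.mp hM with rfl | hM
        · exact Or.inl (Or.inr ⟨i, hi, hp, rfl⟩)
        · exact Or.inr ⟨M, hM, i, hi, hp, rfl⟩

-- a token is collected by the sweep iff it is a substring of the corpus
theorem pv_found_iff (cs : List Char) (tokens : PySem.Set (List Char)) (ls : List Nat)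
    (tl : List Char) (hmem : PySem.Set.contains tokens tl = true) (hlen : tl.length ∈ ls) :
    PySem.Set.contains
        (ls.foldl (fun fnd L =>
          (List.range (cs.length + 1 - L)).foldl
            (fun s i =>
              if PySem.Set.contains tokens ((cs.drop i).take L)
              then PySem.Set.add s ((cs.drop i).take L) else s) fnd)
          PySem.Set.empty) tl = true
      ↔ tl <:+: cs := by
  rw [PySem.Set.contains_iff,
    pv_mem_outer (fun L i => (cs.drop i).take L)
      (fun L i => PySem.Set.contains tokens ((cs.drop i).take L))
      (fun L => cs.length + 1 - L)]
  constructor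
  · rintro (hx | ⟨L, _, i, _, _, rfl⟩)
    · simp [PySem.Set.empty] at hx
    · exact (List.take_prefix _ _).isInfix.trans (List.drop_suffix i cs).isInfix
  · rintro ⟨s, t, hst⟩
    have hl : s.length + (tl.length + t.length) = cs.length := by
      have := congrArg List.length hst
      simpa using this
    refine Or.inr ⟨tl.length, hlen, s.length, List.mem_range.mpr (by omega), ?_⟩
    have hw : (cs.drop s.length).take tl.length = tl := by
      rw [← hst, List.append_assoc, List.drop_left, List.take_left]
    rw [hw]
    exact ⟨hmem, rfl⟩

-- A's accumulator loop is a countP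
theorem pv_foldl_count (p : String → Bool) : ∀ (l : List String) (g : Int),
    l.foldl (fun grounded token => if p token then grounded + 1 else grounded) g
      = g + ((l.countP p : Nat) : Int) := by
  intro l
  induction l with
  | nil => intro g; simp
  | cons a t ih =>
    intro g
    by_cases h : p a = true <;>
      simp only [List.foldl_cons, List.countP_cons, h, if_true] <;>
      rw [ih] <;> push_cast <;> omega

-- ===== VERDICT =====
theorem check_facts_grounded_py_spec : Claim_equal_check_facts_grounded_py := by
  intro fact_tokens chunk_texts _dom
  unfold Spec_check_facts_grounded_py check_facts_grounded_py check_facts_grounded_py_alt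
  have hc : fact_tokens.countP (fun t =>
        PySem.Set.contains
          (((PySem.Set.ofList ((PySem.Set.ofList (fact_tokens.map String.toList)).map List.length)) : List Nat).foldl
            (fun fnd L =>
              (List.range ((PySem.Str.lower (PySem.Str.join " " chunk_texts)).toList.length + 1 - L)).foldl
                (fun s i =>
                  if PySem.Set.contains (PySem.Set.ofList (fact_tokens.map String.toList))
                      (((PySem.Str.lower (PySem.Str.join " " chunk_texts)).toList.drop i).take L)
                  then PySem.Set.add s
                      (((PySem.Str.lower (PySem.Str.join " " chunk_texts)).toList.drop i).take L) else s)
                fnd)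
            PySem.Set.empty) t.toList)
      = fact_tokens.countP (fun t =>
          PySem.Str.isIn t (PySem.Str.lower (PySem.Str.join " " chunk_texts))) := by
    apply List.countP_congr
    intro a ha
    have hmem : PySem.Set.contains (PySem.Set.ofList (fact_tokens.map String.toList)) a.toList = true := by
      rw [PySem.Set.contains_iff, PySem.Set.mem_ofList]
      exact List.mem_map_of_mem ha
    have hlen : a.toList.length ∈
        ((PySem.Set.ofList ((PySem.Set.ofList (fact_tokens.map String.toList)).map List.length)) : List Nat) := by
      rw [PySem.Set.mem_ofList]
      refine List.mem_map_of_mem ?_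
      rw [PySem.Set.mem_ofList]
      exact List.mem_map_of_mem ha
    rw [Bool.eq_iff_iff, pv_found_iff _ _ _ _ hmem hlen, PySem.Str.isIn_iff_infix]
    simp
  rcases fact_tokens with _ | ⟨f, fs⟩
  · simp
  · simp only [List.isEmpty_cons, Bool.false_eq_true, if_false]
    rw [pv_foldl_count]
    simp only [zero_add, Prod.mk.injEq, and_true]
    rw [← hc]
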